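-- pv_equiv track=rewrite | github.com/servo/servo | decision-task/vendored/taskcluster/utils.py | scopeMatch
-- ===== SOURCE A (Python) =====
-- def scopeMatch(assumedScopes, requiredScopeSets):
--     """
--         Take a list of a assumed scopes, and a list of required scope sets on
--         disjunctive normal form, and check if any of the required scope sets are
--         satisfied.
--
--         Example:
--
--             requiredScopeSets = [
--                 ["scopeA", "scopeB"],
--                 ["scopeC"]
--             ]
--
--         In this case assumed_scopes must contain, either:
--         "scopeA" AND "scopeB", OR just "scopeC".
--     """
--     for scopeSet in requiredScopeSets:
--         for requiredScope in scopeSet: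
--             for scope in assumedScopes:
--                 if scope == requiredScope:
--                     # requiredScope satisifed, no need to check more scopes
--                     break
--                 if scope.endswith("*") and requiredScope.startswith(scope[:-1]):
--                     # requiredScope satisifed, no need to check more scopes
--                     break
--             else:
--                 # requiredScope not satisfied, stop checking scopeSet
--                 break
--         else:
--             # scopeSet satisfied, so we're happy
--             return True
--     # none of the requiredScopeSets were satisfied
--     return False
-- ===== SOURCE B (Python) =====
-- def scopeMatch(assumedScopes, requiredScopeSets):
--     exact = set(assumedScopes)
--     wild = set(s[:-1] for s in assumedScopes if s.endswith("*"))
--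
--     def ok(req):
--         # a wildcard grant p* covers req iff p is one of req's own prefixes:
--         # enumerate req's prefixes and hash-look each up, never scanning the grants
--         if req in exact:
--             return True
--         for i in range(len(req) + 1):
--             if req[:i] in wild:
--                 return True
--         return False
--
--     return any(all(ok(r) for r in scopeSet) for scopeSet in requiredScopeSets)
-- ===== Notes on version B (the rewrite author's own statement) =====
-- stated objective: faster
-- what changed: B inverts the matching direction: instead of scanning the assumed-scope list per required scope (A's triple loop), it builds two hash sets once and decides each required scope by enumerating that scope's OWN prefixes and hash-looking each up in the wildcard-prefix set, so the per-scope work is independent of the number of assumed scopes.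
import Mathlib
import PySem

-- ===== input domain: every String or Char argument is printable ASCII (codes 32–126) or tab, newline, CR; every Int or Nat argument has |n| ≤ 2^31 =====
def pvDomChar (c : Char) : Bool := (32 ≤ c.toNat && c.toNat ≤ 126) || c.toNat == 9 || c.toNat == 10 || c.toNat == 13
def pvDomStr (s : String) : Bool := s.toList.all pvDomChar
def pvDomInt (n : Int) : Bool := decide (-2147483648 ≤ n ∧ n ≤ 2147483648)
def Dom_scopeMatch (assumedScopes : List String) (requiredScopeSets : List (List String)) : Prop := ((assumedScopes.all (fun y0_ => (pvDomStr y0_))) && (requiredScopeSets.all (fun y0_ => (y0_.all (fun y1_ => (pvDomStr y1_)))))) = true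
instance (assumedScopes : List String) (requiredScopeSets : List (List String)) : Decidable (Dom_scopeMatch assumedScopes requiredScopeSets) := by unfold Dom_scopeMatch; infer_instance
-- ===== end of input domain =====

-- B inverts the matching direction: hash sets of exact scopes and wildcard prefixes built once, each required scope decided by looking up its own prefixes (faster in a timing run).


-- ===== PORT A =====
-- inner 'for scope in assumedScopes' loop: true = the loop broke (requiredScope satisfied), false = it completed
def scopeMatchInnerA (requiredScope : String) (scopes : List String) : Bool :=
  match scopes with
  | [] => false
  | scope :: rest =>
    if scope == requiredScope then true
    else if PySem.Str.endswith scope "*" && PySem.Str.startswith requiredScope (PySem.Str.slice scope none (some (-1))) then true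
    else scopeMatchInnerA requiredScope rest

-- middle 'for requiredScope in scopeSet' loop: true = the for-else ran (scopeSet satisfied)
def scopeMatchSetA (assumedScopes : List String) (scopeSet : List String) : Bool :=
  match scopeSet with
  | [] => true
  | r :: rest =>
    if scopeMatchInnerA r assumedScopes then scopeMatchSetA assumedScopes rest
    else false

def scopeMatch (assumedScopes : List String) (requiredScopeSets : List (List String)) : Bool :=
  match requiredScopeSets with
  | [] => false
  | scopeSet :: rest =>
    if scopeMatchSetA assumedScopes scopeSet then true
    else scopeMatch assumedScopes rest

-- ===== PORT B =====
-- 'ok(req)': req in exact, or one of req's own prefixes req[:i] (i = 0..len(req)) is in the wildcard-prefix set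
def scopeMatchOkB (exact : PySem.Set String) (wild : PySem.Set String) (req : String) : Bool :=
  PySem.Set.contains exact req ||
    (PySem.List.pyRange 0 (PySem.Str.len req + 1) 1).any
      (fun i => PySem.Set.contains wild (PySem.Str.slice req none (some i)))

def scopeMatch_alt (assumedScopes : List String) (requiredScopeSets : List (List String)) : Bool :=
  let exact : PySem.Set String := PySem.Set.ofList assumedScopes
  let wild : PySem.Set String :=
    PySem.Set.ofList
      ((assumedScopes.filter (fun s => PySem.Str.endswith s "*")).map
        (fun s => PySem.Str.slice s none (some (-1))))
  requiredScopeSets.any (fun scopeSet => scopeSet.all (scopeMatchOkB exact wild))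

-- ===== PRECONDITION & SPEC =====
def Spec_scopeMatch (assumedScopes : List String) (requiredScopeSets : List (List String)) (out : Bool) : Prop := out = scopeMatch_alt assumedScopes requiredScopeSets
instance (assumedScopes : List String) (requiredScopeSets : List (List String)) (out : Bool) : Decidable (Spec_scopeMatch assumedScopes requiredScopeSets out) := by unfold Spec_scopeMatch; infer_instance

-- ===== CLAIM (what is proved, stated in full; the proofs are below) =====
def Claim_equal_scopeMatch : Prop := ∀ (assumedScopes : List String) (requiredScopeSets : List (List String)), Dom_scopeMatch assumedScopes requiredScopeSets → Spec_scopeMatch assumedScopes requiredScopeSets (scopeMatch assumedScopes requiredScopeSets)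

-- ===== LEMMAS AND PROOFS =====

lemma contains_ofList_iff (W : List String) (r : String) :
    PySem.Set.contains (PySem.Set.ofList W) r = true ↔ r ∈ W := by
  simp [PySem.Set.contains, PySem.Set.mem_ofList]

-- the prefix-enumeration scan of B finds a member of W iff some member of W is a prefix of r
lemma prefix_scan_iff (W : List String) (r : String) :
    ((PySem.List.pyRange 0 (PySem.Str.len r + 1) 1).any
        (fun i => PySem.Set.contains (PySem.Set.ofList W) (PySem.Str.slice r none (some i))) = true)
      ↔ ∃ p ∈ W, p.toList <+: r.toList := by
  rw [List.any_eq_true]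
  constructor
  · rintro ⟨i, hi, hc⟩
    rw [PySem.List.mem_pyRange_one] at hi
    refine ⟨PySem.Str.slice r none (some i), (contains_ofList_iff _ _).mp hc, ?_⟩
    have : (PySem.Str.slice r none (some i)).toList = r.toList.take i.toNat := by
      simp [PySem.List.slice_to _ hi.1]
    rw [this]
    exact List.take_prefix _ _
  · rintro ⟨p, hp, hpre⟩
    refine ⟨(p.toList.length : Int), ?_, ?_⟩
    · rw [PySem.List.mem_pyRange_one]
      have := hpre.length_le
      simp at this ⊢
      omega
    · rw [contains_ofList_iff]
      have ht : (PySem.Str.slice r none (some (p.toList.length : Int))).toList = p.toList := by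
        simp [PySem.List.slice_to_natCast]
        exact (List.prefix_iff_eq_take.mp hpre).symm
      have := String.toList_inj.mp ht
      rwa [this]

lemma startswith_iff' (r p : String) :
    PySem.Str.startswith r p = true ↔ p.toList <+: r.toList := by
  simp [PySem.Chars.startswith_iff]

-- what A's inner loop over the assumed scopes decides
lemma innerA_iff (r : String) (scopes : List String) :
    scopeMatchInnerA r scopes = true ↔
      ∃ s ∈ scopes, s = r ∨ (PySem.Str.endswith s "*" = true ∧
        PySem.Str.startswith r (PySem.Str.slice s none (some (-1))) = true) := by
  induction scopes with
  | nil => simp [scopeMatchInnerA]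
  | cons s rest ih =>
    rw [scopeMatchInnerA]
    split_ifs with h1 h2
    · simp only [beq_iff_eq] at h1
      simp [h1]
    · simp only [Bool.and_eq_true] at h2
      simp only [List.mem_cons]
      constructor
      · intro _; exact ⟨s, Or.inl rfl, Or.inr h2⟩
      · intro _; trivial
    · simp only [beq_iff_eq] at h1
      simp only [Bool.and_eq_true, not_and_or, Bool.not_eq_true] at h2
      rw [ih]
      simp only [List.mem_cons]
      constructor
      · rintro ⟨t, ht, hd⟩; exact ⟨t, Or.inr ht, hd⟩
      · rintro ⟨t, ht | ht, hd⟩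
        · subst ht
          rcases hd with rfl | ⟨he, hs⟩
          · exact absurd rfl h1
          · rcases h2 with h | h <;> simp_all
        · exact ⟨t, ht, hd⟩

-- A's inner loop over the assumed scopes equals B's ok(req)
lemma inner_eq_ok (scopes : List String) (r : String) :
    scopeMatchInnerA r scopes =
      scopeMatchOkB (PySem.Set.ofList scopes)
        (PySem.Set.ofList ((scopes.filter (fun s => PySem.Str.endswith s "*")).map
          (fun s => PySem.Str.slice s none (some (-1))))) r := by
  rw [Bool.eq_iff_iff, innerA_iff, scopeMatchOkB, Bool.or_eq_true, contains_ofList_iff,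
    prefix_scan_iff]
  simp only [List.mem_map, List.mem_filter]
  constructor
  · rintro ⟨s, hs, rfl | ⟨he, hst⟩⟩
    · exact Or.inl hs
    · exact Or.inr ⟨_, ⟨s, ⟨hs, he⟩, rfl⟩, (startswith_iff' _ _).mp hst⟩
  · rintro (hr | ⟨p, ⟨s, ⟨hs, he⟩, rfl⟩, hpre⟩)
    · exact ⟨r, hr, Or.inl rfl⟩
    · exact ⟨s, hs, Or.inr ⟨he, (startswith_iff' _ _).mpr hpre⟩⟩

lemma setA_eq (assumedScopes : List String) (scopeSet : List String) :
    scopeMatchSetA assumedScopes scopeSet =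
      scopeSet.all (scopeMatchOkB (PySem.Set.ofList assumedScopes)
        (PySem.Set.ofList ((assumedScopes.filter (fun s => PySem.Str.endswith s "*")).map
          (fun s => PySem.Str.slice s none (some (-1)))))) := by
  induction scopeSet with
  | nil => rfl
  | cons r rest ih =>
    rw [scopeMatchSetA, inner_eq_ok, List.all_cons, ih]
    cases h : scopeMatchOkB _ _ r <;> simp

lemma outer_eq (assumedScopes : List String) (requiredScopeSets : List (List String)) :
    scopeMatch assumedScopes requiredScopeSets =
      requiredScopeSets.any (scopeMatchSetA assumedScopes) := by
  induction requiredScopeSets with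
  | nil => rfl
  | cons s rest ih =>
    rw [scopeMatch, List.any_cons, ih]
    cases h : scopeMatchSetA assumedScopes s <;> simp

-- ===== VERDICT (by name: the statement is the Claim_ definition above) =====
theorem scopeMatch_spec : Claim_equal_scopeMatch := by
  intro assumedScopes requiredScopeSets _
  unfold Spec_scopeMatch scopeMatch_alt
  rw [outer_eq]
  congr 1
  funext scopeSet
  exact setA_eq assumedScopes scopeSet
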